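-- pv_equiv track=rewrite | github.com/gtavella/Esami | 18-02-19/es2.py | elabora_lista
-- ===== SOURCE A (Python) =====
-- def somma_precedenti(M, curr_index):
--     s = 0
--     for i in range(0, curr_index):
--         s += M[i]
--     return s
--
-- def somma_successivi(M, curr_index):
--     s = 0
--     for i in range(curr_index+1, len(M)):
--         s += M[i]
--     return s
--
-- def elabora_lista(L1):
--     L2 = [0] * len(L1)
--     for i in range(len(L1)):
--         # somma precedenti
--         spi = somma_precedenti(L1, i)
--         # somma successivi
--         ssi = somma_successivi(L1, i)
--
--         if spi > ssi:
--             max_somma = spi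
--         else:
--             max_somma = ssi
--         L2[i] = max_somma
--     return L2
-- ===== SOURCE B (Python) =====
-- def elabora_lista(L1):
--     total = sum(L1)
--     out = []
--     pref = 0
--     for x in L1:
--         suf = total - pref - x
--         out.append(pref if pref > suf else suf)
--         pref += x
--     return out
-- ===== Notes on version B (the rewrite author's own statement) =====
-- stated objective: faster
-- what changed: replaced the per-index rescans (somma_precedenti/somma_successivi) by one pass keeping a running prefix sum and deriving the suffix sum as total - prefix - current
import Mathlib
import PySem

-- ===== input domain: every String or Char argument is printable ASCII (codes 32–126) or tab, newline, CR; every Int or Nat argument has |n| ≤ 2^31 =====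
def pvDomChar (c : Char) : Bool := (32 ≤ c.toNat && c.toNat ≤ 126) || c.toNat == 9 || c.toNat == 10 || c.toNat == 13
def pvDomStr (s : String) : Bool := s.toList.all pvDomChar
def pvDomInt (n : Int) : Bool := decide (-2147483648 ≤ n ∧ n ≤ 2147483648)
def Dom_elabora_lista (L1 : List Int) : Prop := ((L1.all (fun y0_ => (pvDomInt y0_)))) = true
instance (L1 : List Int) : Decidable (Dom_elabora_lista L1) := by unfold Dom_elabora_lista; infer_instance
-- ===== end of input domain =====

-- B replaces A's quadratic per-index rescans by one pass with a running prefix sum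
-- (suffix = total - prefix - current); objective: faster (asymptotic).

-- ===== PORT A =====
def somma_precedenti (M : List Int) (curr_index : Int) : Int :=
  (PySem.List.pyRange 0 curr_index 1).foldl (fun s i => s + PySem.List.pyGetD M i 0) 0

def somma_successivi (M : List Int) (curr_index : Int) : Int :=
  (PySem.List.pyRange (curr_index + 1) (M.length : Int) 1).foldl
    (fun s i => s + PySem.List.pyGetD M i 0) 0

def elabora_lista (L1 : List Int) : List Int :=
  (PySem.List.pyRange 0 (L1.length : Int) 1).foldl (fun L2 i =>
    let spi := somma_precedenti L1 i
    let ssi := somma_successivi L1 i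
    let max_somma := if spi > ssi then spi else ssi
    PySem.List.pySetD L2 i max_somma) (List.replicate L1.length 0)

-- ===== PORT B =====
def elabora_lista_alt (L1 : List Int) : List Int :=
  let total := L1.sum
  (L1.foldl (fun (st : List Int × Int) x =>
      let suf := total - st.2 - x
      (st.1 ++ [if st.2 > suf then st.2 else suf], st.2 + x)) ([], 0)).1

-- ===== PRECONDITION & SPEC =====
def Spec_elabora_lista (L1 : List Int) (out : List Int) : Prop := out = elabora_lista_alt L1
instance (L1 : List Int) (out : List Int) : Decidable (Spec_elabora_lista L1 out) := by unfold Spec_elabora_lista; infer_instance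

-- ===== CLAIM (what is proved, stated in full; the proofs are below) =====
def Claim_equal_elabora_lista : Prop := ∀ (L1 : List Int), Dom_elabora_lista L1 → Spec_elabora_lista L1 (elabora_lista L1)

-- ===== LEMMAS AND PROOFS =====

-- generic set-fold over range: filling a length-n prefix index by index
lemma setfold (f : Nat → Int) : ∀ (n : Nat) (acc : List Int), n ≤ acc.length →
    (List.range n).foldl (fun L2 i => L2.set i (f i)) acc
      = (List.range n).map f ++ acc.drop n := by
  intro n
  induction n with
  | zero => simp
  | succ n ih =>
    intro acc h
    rw [List.range_succ, List.foldl_append, ih acc (by omega)]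
    simp only [List.foldl_cons, List.foldl_nil, List.map_append, List.map_cons, List.map_nil]
    have hd : acc.drop n = acc[n] :: acc.drop (n + 1) :=
      List.drop_eq_getElem_cons (by omega)
    rw [hd]
    have hlen : ((List.range n).map f).length = n := by simp
    rw [List.set_append, if_neg (by simp)]
    simp
    rw [hd, List.set_cons_zero]

-- prefix indexing: the first k pyGetD reads are exactly take k
lemma map_pyGetD_take (L1 : List Int) (k : Nat) (h : k ≤ L1.length) :
    (PySem.List.pyRange 0 (k : Int) 1).map (fun j => PySem.List.pyGetD L1 j 0) = L1.take k := by
  have hsplit := PySem.List.pyRange_one_append 0 (k : Int) (L1.length : Int)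
    (by omega) (by exact_mod_cast h)
  have hall : (PySem.List.pyRange 0 (L1.length : Int) 1).map
      (fun j => PySem.List.pyGetD L1 j 0) = L1 :=
    PySem.List.map_pyGetD_pyRange_zero' L1 0
  have hdrop : (PySem.List.pyRange (k : Int) (L1.length : Int) 1).map
      (fun j => PySem.List.pyGetD L1 j 0) = L1.drop ((k : Int)).toNat :=
    PySem.List.map_pyGetD_pyRange' L1 0 (a := (k : Int)) (by omega)
  rw [hsplit, List.map_append, hdrop] at hall
  simp only [Int.toNat_natCast] at hall
  exact List.append_cancel_right (hall.trans (List.take_append_drop k L1).symm)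

lemma spi_eq (L1 : List Int) (k : Nat) (h : k ≤ L1.length) :
    somma_precedenti L1 (k : Int) = (L1.take k).sum := by
  unfold somma_precedenti
  rw [PySem.List.foldl_add _ (fun i => PySem.List.pyGetD L1 i 0) 0, map_pyGetD_take L1 k h]
  simp

lemma ssi_eq (L1 : List Int) (k : Nat) :
    somma_successivi L1 (k : Int) = (L1.drop (k + 1)).sum := by
  unfold somma_successivi
  have h := PySem.List.foldl_pyRange_pyGetD' L1 0 (fun s x => s + x) 0
    (a := (k : Int) + 1) (by omega)
  rw [h]
  have : ((k : Int) + 1).toNat = k + 1 := by omega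
  rw [this, List.sum_eq_foldl]

-- the common closed form of both programs
def pvVal (L1 : List Int) (k : Nat) : Int :=
  let spi := (L1.take k).sum
  let ssi := (L1.drop (k + 1)).sum
  if spi > ssi then spi else ssi

lemma a_eq (L1 : List Int) :
    elabora_lista L1 = (List.range L1.length).map (pvVal L1) := by
  unfold elabora_lista
  rw [PySem.List.pyRange_zero_nat, List.foldl_map]
  simp only [PySem.List.pySetD_natCast]
  rw [setfold (fun k => let spi := somma_precedenti L1 (k : Int);
        let ssi := somma_successivi L1 (k : Int);
        if spi > ssi then spi else ssi) L1.length (List.replicate L1.length 0) (by simp)]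
  simp only [List.drop_replicate, Nat.sub_self, List.replicate_zero, List.append_nil]
  apply List.map_congr_left
  intro k hk
  rw [List.mem_range] at hk
  simp only [spi_eq L1 k (by omega), ssi_eq L1 k, pvVal]

lemma bfold (T : Int) : ∀ (t : List Int) (p : Int) (out : List Int),
    (t.foldl (fun (st : List Int × Int) x =>
        let suf := T - st.2 - x
        (st.1 ++ [if st.2 > suf then st.2 else suf], st.2 + x)) (out, p)).1
      = out ++ (List.range t.length).map (fun k =>
          let pref := p + (t.take k).sum
          let suf := T - pref - t.getD k 0
          if pref > suf then pref else suf) := by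
  intro t
  induction t with
  | nil => simp
  | cons x t ih =>
    intro p out
    simp only [List.foldl_cons, ih (p + x) (out ++ [_]), List.length_cons,
      List.range_succ_eq_map, List.map_cons, List.map_map]
    simp only [List.take_zero, List.sum_nil, add_zero, List.getD_cons_zero, List.append_assoc,
      List.singleton_append]
    congr 2
    refine List.map_congr_left fun k _ => ?_
    simp [List.take_succ_cons, add_assoc]

lemma sum_split (L1 : List Int) (k : Nat) (h : k < L1.length) :
    L1.sum = (L1.take k).sum + L1.getD k 0 + (L1.drop (k + 1)).sum := by
  conv_lhs => rw [← List.take_append_drop k L1]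
  rw [List.sum_append, List.drop_eq_getElem_cons h, List.sum_cons,
    List.getD_eq_getElem L1 0 h]
  ring

lemma b_eq (L1 : List Int) :
    elabora_lista_alt L1 = (List.range L1.length).map (pvVal L1) := by
  unfold elabora_lista_alt
  rw [bfold L1.sum L1 0 []]
  simp only [List.nil_append]
  apply List.map_congr_left
  intro k hk
  rw [List.mem_range] at hk
  have hs := sum_split L1 k hk
  simp only [pvVal, zero_add]
  have : L1.sum - (L1.take k).sum - L1.getD k 0 = (L1.drop (k + 1)).sum := by omega
  rw [this]

-- ===== VERDICT (by name: the statement is the Claim_ definition above) =====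
theorem elabora_lista_spec : Claim_equal_elabora_lista := by
  intro L1 _
  unfold Spec_elabora_lista
  rw [a_eq, b_eq]
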